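-- pv_equiv track=rewrite | github.com/ngdangdat/adventofcode | 2015/day5/count_nice_string.py | contains_char_dup_triplet
-- ===== SOURCE A (Python) =====
-- def contains_char_dup_triplet(ip):
--     for i in range(len(ip) - 2):
--         start = i
--         end = i + 3
--         triplet = ip[start:end]
--         if triplet[0] == triplet[2]:
--             return True
--     return False
-- ===== SOURCE B (Python) =====
-- def contains_char_dup_triplet(ip):
--     positions = {}
--     for i, c in enumerate(ip):
--         positions.setdefault(c, set()).add(i)
--     return any(i + 2 in s for s in positions.values() for i in s)
-- ===== Notes on version B (the rewrite author's own statement) =====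
-- stated objective: alternative
-- what changed: B builds a dict mapping each character to the set of its indices in one grouping pass and then asks whether any character owns two indices exactly 2 apart via set membership, instead of A's sliding-window scan that slices each 3-char window and compares its ends.
import Mathlib
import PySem

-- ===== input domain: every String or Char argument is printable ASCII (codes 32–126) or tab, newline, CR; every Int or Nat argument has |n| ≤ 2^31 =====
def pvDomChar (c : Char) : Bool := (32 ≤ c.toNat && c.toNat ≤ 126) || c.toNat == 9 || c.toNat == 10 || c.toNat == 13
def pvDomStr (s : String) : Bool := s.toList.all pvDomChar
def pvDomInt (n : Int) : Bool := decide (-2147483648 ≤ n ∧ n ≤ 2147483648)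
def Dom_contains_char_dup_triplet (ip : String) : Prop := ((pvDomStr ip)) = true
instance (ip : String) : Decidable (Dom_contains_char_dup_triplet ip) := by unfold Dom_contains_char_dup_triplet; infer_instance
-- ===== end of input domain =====

-- B replaces A's sliding-window scan by a grouping pass: a dict from each character to the set
-- of its indices, then a membership query for two indices exactly 2 apart (alternative; same cost).

-- ===== PORT A =====
-- A's for-loop over range(len(ip)-2) with early 'return True'
def pvALoop (l : List Char) : List Int → Bool
  | [] => false
  | i :: rest =>
    let start := i
    let «end» := i + 3
    let triplet := PySem.List.slice l (some start) (some «end»)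
    if PySem.List.pyGet? triplet 0 == PySem.List.pyGet? triplet 2 then true
    else pvALoop l rest

def contains_char_dup_triplet (ip : String) : Bool :=
  pvALoop ip.toList (PySem.List.pyRange 0 ((ip.toList.length : Int) - 2) 1)

-- ===== PORT B =====
-- Source B: positions = {}; for i, c in enumerate(ip): positions.setdefault(c, set()).add(i)
--       (setdefault-then-mutate = store add(get(c, set()), i), i.e. Dict.modify)
--       return any(i + 2 in s for s in positions.values() for i in s)
def pvBuild (l : List Char) : PySem.Dict Char (PySem.Set Int) :=
  (PySem.List.enumerate l 0).foldl
    (fun d p => d.modify p.2 PySem.Set.empty (fun s => PySem.Set.add s p.1))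
    PySem.Dict.empty

def contains_char_dup_triplet_alt (ip : String) : Bool :=
  (pvBuild ip.toList).values.any (fun s => s.any (fun i => PySem.Set.contains s (i + 2)))

-- ===== PRECONDITION & SPEC =====
def Spec_contains_char_dup_triplet (ip : String) (out : Bool) : Prop := out = contains_char_dup_triplet_alt ip
instance (ip : String) (out : Bool) : Decidable (Spec_contains_char_dup_triplet ip out) := by unfold Spec_contains_char_dup_triplet; infer_instance

-- ===== CLAIM (what is proved, stated in full; the proofs are below) =====
def Claim_equal_contains_char_dup_triplet : Prop := ∀ (ip : String), Dom_contains_char_dup_triplet ip → Spec_contains_char_dup_triplet ip (contains_char_dup_triplet ip)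

-- ===== LEMMAS AND PROOFS =====

-- common characterisation: some index k has l[k] = l[k+2]
def pvHasTrip (l : List Char) : Prop := ∃ k, k + 2 < l.length ∧ l[k]? = l[k+2]?

-- A's loop starting at i equals the any-over-zip of the two suffixes (structure of A's scan)
lemma pvALoop_range (l : List Char) (i : Nat) :
    pvALoop l (PySem.List.pyRange (i : Int) ((l.length : Int) - 2) 1)
      = ((l.drop i).zip (l.drop (i + 2))).any (fun p => p.1 == p.2) := by
  by_cases h : (i : Int) < (l.length : Int) - 2
  · have hi2 : i + 2 < l.length := by omega
    have hi1 : i + 1 < l.length := by omega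
    have hi0 : i < l.length := by omega
    rw [PySem.List.pyRange_one_cons h]
    have htrip : PySem.List.slice l (some (i : Int)) (some ((i : Int) + 3))
        = (l.drop i).take 3 := by
      have : ((i : Int) + 3) = ((i + 3 : Nat) : Int) := by push_cast; ring
      rw [this, PySem.List.slice_natCast]
      congr 1
      omega
    have hd0 : l.drop i = l[i] :: l.drop (i + 1) := List.drop_eq_getElem_cons hi0
    have hd1 : l.drop (i + 1) = l[i+1] :: l.drop (i + 2) := List.drop_eq_getElem_cons hi1
    have hd2 : l.drop (i + 2) = l[i+2] :: l.drop (i + 3) := List.drop_eq_getElem_cons hi2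
    have htrip3 : (l.drop i).take 3 = [l[i], l[i+1], l[i+2]] := by
      rw [hd0, hd1, hd2]
      simp only [List.take_succ_cons, List.take_zero]
    have hcast : ((i : Int) + 1) = ((i + 1 : Nat) : Int) := by push_cast; ring
    have h12 : i + 1 + 2 = i + 3 := by omega
    have ih := pvALoop_range l (i + 1)
    show (if PySem.List.pyGet? (PySem.List.slice l (some (i:Int)) (some ((i:Int) + 3))) 0
            == PySem.List.pyGet? (PySem.List.slice l (some (i:Int)) (some ((i:Int) + 3))) 2
          then true
          else pvALoop l (PySem.List.pyRange ((i : Int) + 1) ((l.length : Int) - 2) 1)) = _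
    rw [htrip, htrip3, hcast, ih, h12]
    rw [hd0, hd2]
    have hg0 : PySem.List.pyGet? [l[i], l[i+1], l[i+2]] 0 = some l[i] := rfl
    have hg2 : PySem.List.pyGet? [l[i], l[i+1], l[i+2]] 2 = some l[i+2] := rfl
    rw [hg0, hg2]
    have hsome : ((some l[i] : Option Char) == some l[i+2]) = (l[i] == l[i+2]) := rfl
    rw [hsome, List.zip_cons_cons, List.any_cons]
    cases hcb : l[i] == l[i+2] <;> simp
  · have hnil : PySem.List.pyRange (i : Int) ((l.length : Int) - 2) 1 = [] :=
      PySem.List.pyRange_one_eq_nil (by omega)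
    have hdrop : l.drop (i + 2) = [] := List.drop_eq_nil_of_le (by omega)
    rw [hnil, hdrop]
    simp [pvALoop]
termination_by l.length - i

-- index-shift glue for getElem
lemma pvGetElem_idx (l : List Char) {i j : Nat} (h : i = j) (hj : j < l.length) :
    l[i]'(h ▸ hj) = l[j] := by subst h; rfl

-- any over a zip as an existential over a common index
lemma pvZipAny_iff (a b : List Char) :
    (a.zip b).any (fun p => p.1 == p.2) = true
      ↔ ∃ k, ∃ (h1 : k < a.length), ∃ (h2 : k < b.length), a[k] = b[k] := by
  induction a generalizing b with
  | nil => simp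
  | cons x a ih =>
    cases b with
    | nil => simp
    | cons y b =>
      simp only [List.zip_cons_cons, List.any_cons, Bool.or_eq_true, beq_iff_eq, ih]
      constructor
      · rintro (h | ⟨k, h1, h2, h⟩)
        · exact ⟨0, by simp, by simp, h⟩
        · exact ⟨k + 1, by simpa using h1, by simpa using h2, by simpa using h⟩
      · rintro ⟨k, h1, h2, h⟩
        cases k with
        | zero => exact Or.inl (by simpa using h)
        | succ k => exact Or.inr ⟨k, by simpa using h1, by simpa using h2, by simpa using h⟩

lemma pvA_iff (ip : String) : contains_char_dup_triplet ip = true ↔ pvHasTrip ip.toList := by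
  unfold contains_char_dup_triplet pvHasTrip
  rw [show (0 : Int) = ((0 : Nat) : Int) from rfl, pvALoop_range ip.toList 0]
  simp only [List.drop_zero, Nat.zero_add]
  rw [pvZipAny_iff]
  constructor
  · rintro ⟨k, h1, h2, h⟩
    have hlen : k + 2 < ip.toList.length := by
      simp only [List.length_drop] at h2; omega
    refine ⟨k, hlen, ?_⟩
    rw [List.getElem?_eq_getElem (show k < ip.toList.length by omega),
        List.getElem?_eq_getElem hlen, Option.some_inj]
    have h' : ip.toList[k]'(by omega) = ip.toList[2 + k]'(by omega) :=
      h.trans List.getElem_drop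
    calc ip.toList[k]'(by omega) = ip.toList[2 + k]'(by omega) := h'
      _ = ip.toList[k + 2]'hlen := pvGetElem_idx ip.toList (by omega) hlen
  · rintro ⟨k, hlen, h⟩
    have hk : k < ip.toList.length := by omega
    rw [List.getElem?_eq_getElem hk, List.getElem?_eq_getElem hlen, Option.some_inj] at h
    have h2 : k < (ip.toList.drop 2).length := by
      simp only [List.length_drop]; omega
    refine ⟨k, hk, h2, ?_⟩
    calc ip.toList[k]'hk = ip.toList[k + 2]'hlen := h
      _ = ip.toList[2 + k]'(by omega) := pvGetElem_idx ip.toList (by omega) (by omega)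
      _ = (ip.toList.drop 2)[k]'h2 := List.getElem_drop.symm

-- membership in the index-set the grouping fold stores under character c
lemma pvMem_getD_build (ps : List (Int × Char)) (d : PySem.Dict Char (PySem.Set Int))
    (c : Char) (j : Int) :
    j ∈ (ps.foldl (fun d p => d.modify p.2 PySem.Set.empty (fun s => PySem.Set.add s p.1)) d).getD c PySem.Set.empty
      ↔ j ∈ d.getD c PySem.Set.empty ∨ ∃ p ∈ ps, p.2 = c ∧ p.1 = j := by
  induction ps generalizing d with
  | nil => simp
  | cons p ps ih =>
    simp only [List.foldl_cons, ih, List.mem_cons]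
    rw [PySem.Dict.getD_modify]
    constructor
    · rintro (h | h)
      · split_ifs at h with hc
        · rcases (PySem.Set.mem_add _ _ _).mp h with h' | h'
          · exact Or.inl (by rw [hc]; exact h')
          · exact Or.inr ⟨p, Or.inl rfl, hc.symm, h'.symm⟩
        · exact Or.inl h
      · obtain ⟨q, hq, hqc, hqj⟩ := h
        exact Or.inr ⟨q, Or.inr hq, hqc, hqj⟩
    · rintro (h | ⟨q, hq | hq, hqc, hqj⟩)
      · left
        split_ifs with hc
        · exact (PySem.Set.mem_add _ _ _).mpr (Or.inl (by rw [hc] at h; exact h))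
        · exact h
      · left
        subst hq
        rw [if_pos hqc.symm]
        exact (PySem.Set.mem_add _ _ _).mpr (Or.inr hqj.symm)
      · exact Or.inr ⟨q, hq, hqc, hqj⟩

lemma pvKeys_build (l : List Char) : (pvBuild l).keys = PySem.Set.ofList l := by
  unfold pvBuild
  rw [PySem.Dict.keys_foldl_modify_key]
  rw [PySem.List.map_snd_enumerate]
  simp only [PySem.Dict.keys_empty]
  exact PySem.Set.update_nil_left l

lemma pvNodup_keys_build (l : List Char) : (pvBuild l).keys.Nodup := by
  rw [pvKeys_build]
  exact PySem.Set.nodup_ofList l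

lemma pvMem_build (l : List Char) (c : Char) (j : Int) :
    j ∈ (pvBuild l).getD c PySem.Set.empty
      ↔ ∃ k : Nat, k < l.length ∧ (k : Int) = j ∧ l[k]? = some c := by
  unfold pvBuild
  rw [pvMem_getD_build]
  simp only [PySem.Dict.getD_empty]
  constructor
  · rintro (h | ⟨p, hp, hpc, hpj⟩)
    · exact absurd h (by simp [PySem.Set.empty])
    · obtain ⟨k, hk, hpk⟩ := (PySem.List.mem_enumerate_iff _ _ _).mp hp
      refine ⟨k, hk, ?_, ?_⟩
      · rw [← hpj, hpk]; simp
      · rw [List.getElem?_eq_getElem hk, ← hpc, hpk]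
  · rintro ⟨k, hk, hkj, hkc⟩
    refine Or.inr ⟨((0 : Int) + (k : Int), l[k]'hk), ?_, ?_, by simpa using hkj⟩
    · exact (PySem.List.mem_enumerate_iff _ _ _).mpr ⟨k, hk, rfl⟩
    · rw [List.getElem?_eq_getElem hk] at hkc
      exact Option.some_inj.mp hkc

lemma pvB_iff (ip : String) : contains_char_dup_triplet_alt ip = true ↔ pvHasTrip ip.toList := by
  unfold contains_char_dup_triplet_alt pvHasTrip
  have hvals : (pvBuild ip.toList).values
      = (pvBuild ip.toList).keys.map (fun c => (pvBuild ip.toList).getD c PySem.Set.empty) :=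
    PySem.Dict.values_eq_map_keys _ (pvNodup_keys_build _) _
  rw [hvals]
  simp only [List.any_map, Function.comp, List.any_eq_true, PySem.Set.contains_iff]
  constructor
  · rintro ⟨c, _, i, hi, hcon⟩
    obtain ⟨k, hk, hkj, hkc⟩ := (pvMem_build _ _ _).mp hi
    obtain ⟨m, hm, hmj, hmc⟩ := (pvMem_build _ _ _).mp hcon
    have hmk : m = k + 2 := by omega
    subst hmk
    exact ⟨k, hm, by rw [hkc, hmc]⟩
  · rintro ⟨k, hk2, hke⟩
    have hkl : k < ip.toList.length := by omega
    obtain ⟨c, hc⟩ : ∃ c, ip.toList[k]? = some c :=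
      ⟨ip.toList[k]'hkl, List.getElem?_eq_getElem hkl⟩
    have hkc2 : ip.toList[k+2]? = some c := by rw [← hke, hc]
    refine ⟨c, ?_, (k : Int), (pvMem_build _ _ _).mpr ⟨k, hkl, rfl, hc⟩, ?_⟩
    · rw [pvKeys_build]
      refine (PySem.Set.mem_ofList _ _).mpr ?_
      rw [List.getElem?_eq_getElem hkl] at hc
      have := List.getElem_mem hkl
      rwa [Option.some_inj.mp hc] at this
    · exact (pvMem_build _ _ _).mpr ⟨k + 2, hk2, by push_cast; ring, hkc2⟩

lemma pv_main (ip : String) :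
    contains_char_dup_triplet ip = contains_char_dup_triplet_alt ip := by
  have ha := pvA_iff ip
  have hb := pvB_iff ip
  cases h1 : contains_char_dup_triplet ip <;> cases h2 : contains_char_dup_triplet_alt ip <;>
    simp_all

-- ===== VERDICT (by name: the statement is the Claim_ definition above) =====
theorem contains_char_dup_triplet_spec : Claim_equal_contains_char_dup_triplet := by
  intro ip _
  exact pv_main ip
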